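-- pv_equiv track=rewrite | github.com/briannatran1/hackerrank-python | zigzag.py | find_zigzag_triples
-- ===== SOURCE A (Python) =====
-- def find_zigzag_triples(numbers):
--     '''req:
--         - fn takes arr of int
--         - return arr of 1s and 0s; 1 --> zigzag
--
--         >>> [1,2,1,3,4]
--         [1,1,0]
--     '''
--     # sliding window approach
--     zigzag_triples = []
--     n = len(numbers)
--
--     for i in range(n - 2):
--         window = numbers[i:i + 3]  # Sliding window of size 3
--         if window[0] < window[1] > window[2] or window[0] > window[1] < window[2]:
--             zigzag_triples.append(1)
--         else:
--             zigzag_triples.append(0)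
--     return zigzag_triples
-- ===== SOURCE B (Python) =====
-- def find_zigzag_triples(numbers):
--     # difference-sign pass: sign of each adjacent step, then combine neighbours
--     signs = [(b > a) - (b < a) for a, b in zip(numbers, numbers[1:])]
--     return [1 if x * y == -1 else 0 for x, y in zip(signs, signs[1:])]
-- ===== Notes on version B (the rewrite author's own statement) =====
-- stated objective: alternative
-- what changed: Replaces the sliding length-3 window re-read (slice + two strict comparisons per position) with a one-pass adjacent difference-sign array combined pairwise (product == -1).
import Mathlib
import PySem

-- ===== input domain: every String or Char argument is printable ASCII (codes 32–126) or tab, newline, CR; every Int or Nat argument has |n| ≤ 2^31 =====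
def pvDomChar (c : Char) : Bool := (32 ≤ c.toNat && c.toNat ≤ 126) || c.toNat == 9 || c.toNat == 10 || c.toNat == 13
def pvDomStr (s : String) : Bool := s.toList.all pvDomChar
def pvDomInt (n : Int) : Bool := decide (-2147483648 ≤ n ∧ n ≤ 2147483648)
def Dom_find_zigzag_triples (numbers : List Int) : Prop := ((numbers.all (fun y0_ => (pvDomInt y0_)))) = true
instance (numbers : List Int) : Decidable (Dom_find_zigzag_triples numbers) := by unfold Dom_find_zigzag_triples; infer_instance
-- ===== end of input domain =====

-- B replaces A's sliding length-3 window re-read by an adjacent difference-sign pass combined pairwise (alternative decomposition, same cost).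


-- ===== PORT A =====
-- window[k] is always in range (for i in range(n-2) the slice has length 3), so pyGetD with default 0 is exact here.
def find_zigzag_triples (numbers : List Int) : List Int :=
  let n : Int := numbers.length
  (PySem.List.pyRange 0 (n - 2) 1).foldl (fun zigzag_triples i =>
    let window := PySem.List.slice numbers (some i) (some (i + 3))
    if (PySem.List.pyGetD window 0 0 < PySem.List.pyGetD window 1 0 ∧
        PySem.List.pyGetD window 1 0 > PySem.List.pyGetD window 2 0) ∨
       (PySem.List.pyGetD window 0 0 > PySem.List.pyGetD window 1 0 ∧
        PySem.List.pyGetD window 1 0 < PySem.List.pyGetD window 2 0)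
    then zigzag_triples ++ [1] else zigzag_triples ++ [0]) []

-- ===== PORT B =====
-- numbers[1:] is the tail (slice from 1 = drop 1, exact); the two comprehensions over zip become zip-map.
def find_zigzag_triples_alt (numbers : List Int) : List Int :=
  let signs := (numbers.zip numbers.tail).map
    (fun p => (if p.2 > p.1 then (1 : Int) else 0) - (if p.2 < p.1 then 1 else 0))
  (signs.zip signs.tail).map (fun p => if p.1 * p.2 = -1 then (1 : Int) else 0)

-- ===== PRECONDITION & SPEC =====
def Spec_find_zigzag_triples (numbers : List Int) (out : List Int) : Prop := out = find_zigzag_triples_alt numbers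
instance (numbers : List Int) (out : List Int) : Decidable (Spec_find_zigzag_triples numbers out) := by unfold Spec_find_zigzag_triples; infer_instance

-- ===== CLAIM (what is proved, stated in full; the proofs are below) =====
def Claim_equal_find_zigzag_triples : Prop := ∀ (numbers : List Int), Dom_find_zigzag_triples numbers → Spec_find_zigzag_triples numbers (find_zigzag_triples numbers)

-- ===== LEMMAS AND PROOFS =====

-- canonical structural recursion both ports are reduced to
def pvZig : List Int → List Int
  | a :: b :: c :: r => (if (a < b ∧ b > c) ∨ (a > b ∧ b < c) then 1 else 0) :: pvZig (b :: c :: r)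
  | _ => []

-- product of adjacent difference signs is -1 exactly when the triple zigzags
theorem sgn_mul (a b c : Int) :
    (if ((if b > a then (1 : Int) else 0) - (if b < a then 1 else 0)) *
        ((if c > b then (1 : Int) else 0) - (if c < b then 1 else 0)) = -1 then (1 : Int) else 0) =
    (if (a < b ∧ b > c) ∨ (a > b ∧ b < c) then 1 else 0) := by
  rcases lt_trichotomy a b with h1 | h1 | h1 <;> rcases lt_trichotomy b c with h2 | h2 | h2 <;>
    simp [h1, h2, not_lt_of_gt]

theorem alt_eq_zig : ∀ (l : List Int), find_zigzag_triples_alt l = pvZig l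
  | [] => by simp [find_zigzag_triples_alt, pvZig]
  | [_] => by simp [find_zigzag_triples_alt, pvZig]
  | [_, _] => by simp [find_zigzag_triples_alt, pvZig]
  | a :: b :: c :: r => by
      have ih := alt_eq_zig (b :: c :: r)
      simp only [find_zigzag_triples_alt, List.tail_cons, List.zip_cons_cons, List.map_cons] at ih ⊢
      rw [pvZig, ← ih, sgn_mul]

-- the per-iteration value of A's loop body
def pvBody (l : List Int) (i : Int) : Int :=
  let window := PySem.List.slice l (some i) (some (i + 3))
  if (PySem.List.pyGetD window 0 0 < PySem.List.pyGetD window 1 0 ∧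
      PySem.List.pyGetD window 1 0 > PySem.List.pyGetD window 2 0) ∨
     (PySem.List.pyGetD window 0 0 > PySem.List.pyGetD window 1 0 ∧
      PySem.List.pyGetD window 1 0 < PySem.List.pyGetD window 2 0)
  then 1 else 0

theorem body_shift (x : Int) (l : List Int) (k : Nat) :
    pvBody (x :: l) ((k : Int) + 1) = pvBody l (k : Int) := by
  have h1 : ((k : Int) + 1) = ((k + 1 : Nat) : Int) := by push_cast; ring
  have h2 : ((k + 1 : Nat) : Int) + 3 = ((k + 1 : Nat) : Int) + ((3 : Nat) : Int) := by norm_num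
  have h3 : (k : Int) + 3 = (k : Int) + ((3 : Nat) : Int) := by norm_num
  unfold pvBody
  rw [h1, h2, h3, PySem.List.slice_natCast_add, PySem.List.slice_natCast_add,
    List.drop_succ_cons]

theorem body_zero (a b c : Int) (r : List Int) :
    pvBody (a :: b :: c :: r) ((0 : Nat) : Int) =
      (if (a < b ∧ b > c) ∨ (a > b ∧ b < c) then 1 else 0) := by
  have h : ((0 : Nat) : Int) + 3 = ((0 : Nat) : Int) + ((3 : Nat) : Int) := by norm_num
  have hw : PySem.List.slice (a :: b :: c :: r) (some ((0 : Nat) : Int))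
      (some (((0 : Nat) : Int) + ((3 : Nat) : Int))) = [a, b, c] := by
    rw [PySem.List.slice_natCast_add]; simp
  unfold pvBody
  rw [h, hw]
  simp [pysem]

theorem zig_eq : ∀ (l : List Int),
    pvZig l = (List.range ((l.length : Int) - 2).toNat).map (fun k : Nat => pvBody l (k : Int))
  | [] => by simp [pvZig]
  | [_] => by simp [pvZig]
  | [_, _] => by simp [pvZig]
  | a :: b :: c :: r => by
    have ih := zig_eq (b :: c :: r)
    have hn : (((a :: b :: c :: r).length : Int) - 2).toNat = r.length + 1 := by
      simp; omega
    have hn2 : (((b :: c :: r).length : Int) - 2).toNat = r.length := by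
      simp; omega
    rw [pvZig, ih, hn, hn2, List.range_succ_eq_map, List.map_cons, List.map_map]
    rw [List.cons_eq_cons]
    constructor
    · exact (body_zero a b c r).symm
    · refine (List.map_congr_left ?_).symm
      intro k _
      show pvBody (a :: b :: c :: r) ((Nat.succ k : Nat) : Int) = pvBody (b :: c :: r) (k : Int)
      have : ((Nat.succ k : Nat) : Int) = (k : Int) + 1 := by push_cast; ring
      rw [this, body_shift]

theorem a_eq_zig (l : List Int) : find_zigzag_triples l = pvZig l := by
  have hfun : (fun (acc : List Int) (i : Int) =>
      let window := PySem.List.slice l (some i) (some (i + 3))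
      if (PySem.List.pyGetD window 0 0 < PySem.List.pyGetD window 1 0 ∧
          PySem.List.pyGetD window 1 0 > PySem.List.pyGetD window 2 0) ∨
         (PySem.List.pyGetD window 0 0 > PySem.List.pyGetD window 1 0 ∧
          PySem.List.pyGetD window 1 0 < PySem.List.pyGetD window 2 0)
      then acc ++ [1] else acc ++ [0]) = fun acc i => acc ++ [pvBody l i] := by
    funext acc i
    simp only [pvBody]
    split <;> rfl
  unfold find_zigzag_triples
  rw [hfun, PySem.List.foldl_append_singleton_eq_map, List.nil_append,
    PySem.List.pyRange_one, zig_eq]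
  simp [Function.comp_def]

-- ===== VERDICT (by name: the statement is the Claim_ definition above) =====
theorem find_zigzag_triples_spec : Claim_equal_find_zigzag_triples := by
  intro numbers _
  unfold Spec_find_zigzag_triples
  rw [a_eq_zig, alt_eq_zig]
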